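-- pv_equiv track=rewrite | github.com/aishoot/LeetCode_Python3 | 00. P001-P100/029. Divide Two Integers.py | divide
-- ===== SOURCE A (Python) =====
-- def divide(dividend: int, divisor: int) -> int:
--     positive = (dividend < 0) is (divisor < 0)
--     dividend, divisor = abs(dividend), abs(divisor)
--     res = 0
--
--     while dividend >= divisor:
--         temp, i = divisor, 1
--         # 以下除数temp和商res指数级增长，肯定比每次都执行减操作快
--         while dividend >= temp:
--             dividend -= temp
--             res += i
--             i <<= 1
--             temp <<= 1
--
--     if not positive:
--         res = -res
--
--     return min(max(-2147483648, res), 2147483647)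
-- ===== SOURCE B (Python) =====
-- def divide(dividend: int, divisor: int) -> int:
--     positive = (dividend < 0) == (divisor < 0)
--     res = abs(dividend) // abs(divisor)
--     if not positive:
--         res = -res
--     return min(max(-2147483648, res), 2147483647)
-- ===== Notes on version B (the rewrite author's own statement) =====
-- stated objective: simpler
-- what changed: Replaced the nested doubling-subtraction loops by a closed-form computation: quotient of absolute values via floor division, then sign flip and int32 clamp.
-- outside the precondition, e.g. on divide(5, 0): A does not finish within the time limit, B raises ZeroDivisionError
import Mathlib
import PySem

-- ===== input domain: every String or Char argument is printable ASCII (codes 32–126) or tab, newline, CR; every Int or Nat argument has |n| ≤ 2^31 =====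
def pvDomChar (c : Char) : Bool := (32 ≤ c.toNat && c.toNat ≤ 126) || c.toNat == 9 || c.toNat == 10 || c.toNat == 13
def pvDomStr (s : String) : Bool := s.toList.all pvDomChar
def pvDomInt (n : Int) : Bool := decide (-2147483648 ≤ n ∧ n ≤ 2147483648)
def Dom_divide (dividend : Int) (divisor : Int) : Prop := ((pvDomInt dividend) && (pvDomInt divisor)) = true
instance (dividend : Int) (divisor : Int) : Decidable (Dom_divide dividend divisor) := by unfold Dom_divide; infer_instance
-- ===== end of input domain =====

-- B replaces A's nested doubling-subtraction loops by a closed-form floor division (simpler).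

-- ===== PORT A =====
-- inner 'while dividend >= temp' loop; state (dividend, res), temp and i doubling.
-- The fuel argument is a totality guard only: under Pre_ (divisor ≠ 0) each iteration
-- lowers dividend by temp ≥ 1, so fuel = dividend.toNat + 1 never runs out before the guard fails.
def divideInner (fuel : Nat) (dividend temp i res : Int) : Int × Int :=
  match fuel with
  | 0 => (dividend, res)
  | f + 1 =>
    if temp ≤ dividend then
      divideInner f (dividend - temp) (2 * temp) (2 * i) (res + i)   -- i <<= 1, temp <<= 1
    else (dividend, res)

-- outer 'while dividend >= divisor' loop; fuel again a totality guard (dividend strictly decreases).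
def divideOuter (fuel : Nat) (dividend divisor res : Int) : Int :=
  match fuel with
  | 0 => res
  | f + 1 =>
    if divisor ≤ dividend then
      let p := divideInner (dividend.toNat + 1) dividend divisor 1 res
      divideOuter f p.1 divisor p.2
    else res

def divide (dividend : Int) (divisor : Int) : Int :=
  let positive : Bool := decide (dividend < 0) == decide (divisor < 0)   -- (dividend<0) is (divisor<0)
  let res := divideOuter (|dividend|.toNat + 1) |dividend| |divisor| 0
  let res := if !positive then -res else res
  min (max (-2147483648) res) 2147483647

-- ===== PORT B =====
def divide_alt (dividend : Int) (divisor : Int) : Int :=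
  let positive : Bool := decide (dividend < 0) == decide (divisor < 0)
  let res := PySem.Int.floordiv |dividend| |divisor|
  let res := if !positive then -res else res
  min (max (-2147483648) res) 2147483647

-- ===== PRECONDITION & SPEC =====
-- Pre_ excludes divisor = 0, on which Python A loops forever (subtracting 0) and returns nothing.
def Pre_divide (dividend : Int) (divisor : Int) : Prop := divisor ≠ 0
instance (dividend : Int) (divisor : Int) : Decidable (Pre_divide dividend divisor) := by unfold Pre_divide; infer_instance
def pvWitness_divide : Int × Int := (7, -3)
def Spec_divide (dividend : Int) (divisor : Int) (out : Int) : Prop := out = divide_alt dividend divisor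
instance (dividend : Int) (divisor : Int) (out : Int) : Decidable (Spec_divide dividend divisor out) := by unfold Spec_divide; infer_instance

-- ===== CLAIM (what is proved, stated in full; the proofs are below) =====
def Claim_equal_divide : Prop := ∀ (dividend : Int) (divisor : Int), Dom_divide dividend divisor → Pre_divide dividend divisor → Spec_divide dividend divisor (divide dividend divisor)

-- ===== LEMMAS AND PROOFS =====

theorem divideInner_fst_le (f : Nat) (d t i r : Int) (h1 : 1 ≤ t) : (divideInner f d t i r).1 ≤ d := by
  induction f generalizing d t i r with
  | zero => simp [divideInner]
  | succ f ih =>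
    simp only [divideInner]
    split
    · have := ih (d - t) (2 * t) (2 * i) (r + i) (by omega); omega
    · simp

theorem divideInner_fst_nonneg (f : Nat) (d t i r : Int) (hd : 0 ≤ d) :
    0 ≤ (divideInner f d t i r).1 := by
  induction f generalizing d t i r with
  | zero => simpa [divideInner] using hd
  | succ f ih =>
    simp only [divideInner]
    split
    · exact ih _ _ _ _ (by omega)
    · simpa using hd

theorem divideInner_fst_lt (f : Nat) (d t i r : Int) (h1 : 1 ≤ t) (h2 : t ≤ d) :
    (divideInner (f + 1) d t i r).1 < d := by
  simp only [divideInner, if_pos h2]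
  have := divideInner_fst_le f (d - t) (2 * t) (2 * i) (r + i) (by omega)
  omega

-- invariant: with temp = i * v, dividend + v * res is preserved by the inner loop
theorem divideInner_inv (v : Int) (f : Nat) (d t i r : Int) (ht : t = i * v) :
    (divideInner f d t i r).1 + v * (divideInner f d t i r).2 = d + v * r := by
  induction f generalizing d t i r with
  | zero => simp [divideInner]
  | succ f ih =>
    simp only [divideInner]
    split
    · have := ih (d - t) (2 * t) (2 * i) (r + i) (by rw [ht]; ring)
      subst ht
      rw [this]; ring
    · simp

theorem divideOuter_spec (v : Int) (hv : 1 ≤ v) (f : Nat) (d r : Int)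
    (hd : 0 ≤ d) (hf : d.toNat < f) : divideOuter f d v r = r + d / v := by
  induction f generalizing d r with
  | zero => omega
  | succ f ih =>
    simp only [divideOuter]
    split
    · next hvd =>
      have hinv := divideInner_inv v (d.toNat + 1) d v 1 r (by ring)
      have hlt : (divideInner (d.toNat + 1) d v 1 r).1 < d := divideInner_fst_lt d.toNat d v 1 r hv hvd
      have hnn := divideInner_fst_nonneg (d.toNat + 1) d v 1 r hd
      set p := divideInner (d.toNat + 1) d v 1 r
      rw [ih p.1 p.2 hnn (by omega)]
      have hexp : (p.2 - r) * v = v * p.2 - v * r := by ring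
      have hdeq : d = p.1 + (p.2 - r) * v := by omega
      rw [hdeq, Int.add_mul_ediv_right _ _ (by omega : v ≠ 0)]
      ring
    · next hvd =>
      rw [Int.ediv_eq_zero_of_lt hd (by omega)]
      omega

-- ===== VERDICT (by name: the statement is the Claim_ definition above) =====
theorem divide_spec : Claim_equal_divide := by
  intro dividend divisor _ hpre
  unfold Spec_divide divide divide_alt
  have hv : (1 : Int) ≤ |divisor| := by
    have := abs_pos.mpr hpre; omega
  rw [divideOuter_spec |divisor| hv (|dividend|.toNat + 1) |dividend| 0 (abs_nonneg _) (by omega),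
      PySem.Int.floordiv_eq_ediv_of_pos (by omega)]
  simp
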